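-- pv_equiv track=rewrite | github.com/pedroarthur-almeida/flyfood | fly-f/rotas_utils.py | calcular_rotas
-- ===== SOURCE A (Python) =====
-- def distancia(a, b):
--     #cálculo de manhattan
--     return abs(a[0] - b[0]) + abs(a[1] - b[1])
--
-- def gerar_permutacoes(seq):
--     #se a lista de lugares for ==0 retorna uma lista de lista
--     if len(seq) == 0:
--         return [[]]
--     if len(seq) == 1:
--         #se tiver apenas um elemento,então só tem uma permutação
--         return [seq[:]]
--     perms = [] #cria a lista perms
--     for i in range(len(seq)): # irá interar o for até chegar no tamanho da leitura da lista
--         #pega o valor do i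
--         atual = seq[i]
--         #pega o valor do que sobra e junta em uma lista só
--         resto = seq[:i] + seq[i + 1 :]
--         #chama recursivamente a função gerar permutações
--         for p in gerar_permutacoes(resto):
--             # vai adicionando tudo após a chamada recursiva a lista perms
--             perms.append([atual] + p)
--     #retorna a lista perms
--     return perms
--
-- def calcular_rotas(pontos):
--     #Cria um novo dicionário entregas que terá apenas os pontos de entrega,sem o R
--     entregas = {k: v for k, v in pontos.items() if k != "R"}
--     #pega apenas as chaves dos dicionários e coloca nuna lista
--     letras = list(entregas.keys())
--     if not letras:
--         raise ValueError("Nenhum ponto de entrega encontrado.")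
--     rotas = []
--     #puxa a função gerar permutação com a lista de lugares
--     for perm in gerar_permutacoes(letras):
--         #para cada elemento da lista retornada da função,o elemento será as permutações já feitas
--         custo = 0 #custo inicial
--         rota_completa = ["R"] + list(perm) + ["R"] # lista da rota completa de como deve ser
--         for i in range(len(rota_completa) - 1): #irá interar o i até acabar o tamanho da lista -1
--             #intera os pares consecutivos,indo somando R-->A-->B-->C--> até acabar,ma
--             a, b = rota_completa[i], rota_completa[i + 1]
--             # vai somando os custos
--             custo += distancia(pontos[a], pontos[b])
--             #adiciona na lista de rotas
--         rotas.append((rota_completa, custo))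
--     return rotas
-- ===== SOURCE B (Python) =====
-- def calcular_rotas(pontos):
--     letras = [k for k in pontos if k != "R"]
--     if not letras:
--         raise ValueError("Nenhum ponto de entrega encontrado.")
--     # iterative breadth-first frontier expansion: each step extends every
--     # (prefix, remaining) pair by one chosen element, keeping index order,
--     # which yields permutations in the same lexicographic-by-position order
--     frontier = [([], letras)]
--     for _ in letras:
--         frontier = [(pre + [rem[i]], rem[:i] + rem[i + 1:])
--                     for pre, rem in frontier for i in range(len(rem))]
--     rotas = []
--     for pre, _ in frontier:
--         rota = ["R"] + pre + ["R"]
--         custo = sum(abs(pontos[a][0] - pontos[b][0]) + abs(pontos[a][1] - pontos[b][1])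
--                     for a, b in zip(rota, rota[1:]))
--         rotas.append((rota, custo))
--     return rotas
-- ===== Notes on version B (the rewrite author's own statement) =====
-- stated objective: alternative
-- what changed: Replaces the recursive permutation generator with an iterative breadth-first frontier of (prefix, remaining) pairs, and the index-based cost loop with a sum over zipped consecutive pairs.
import Mathlib
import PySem

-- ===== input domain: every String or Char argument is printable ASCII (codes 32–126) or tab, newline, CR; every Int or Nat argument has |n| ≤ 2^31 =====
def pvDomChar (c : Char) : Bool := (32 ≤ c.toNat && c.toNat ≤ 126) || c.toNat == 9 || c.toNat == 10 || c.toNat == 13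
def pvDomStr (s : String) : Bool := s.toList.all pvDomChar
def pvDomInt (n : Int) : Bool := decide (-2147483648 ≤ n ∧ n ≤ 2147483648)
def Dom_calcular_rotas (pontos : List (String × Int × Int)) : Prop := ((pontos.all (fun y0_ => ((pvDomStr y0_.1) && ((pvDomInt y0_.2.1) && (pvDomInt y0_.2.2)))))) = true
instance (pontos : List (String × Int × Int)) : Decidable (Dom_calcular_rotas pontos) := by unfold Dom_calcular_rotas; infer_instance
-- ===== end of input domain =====

-- B replaces A's recursive permutation generator with an iterative breadth-first
-- frontier of (prefix, remaining) pairs and sums route costs over zipped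
-- consecutive pairs instead of an index loop; same results (objective: alternative).
-- The Python parameter is a dict; both ports receive it as an association list
-- and convert it with PySem.Dict.ofList (Python dict-construction semantics).

-- ===== PORT A =====
def pvDist (a b : Int × Int) : Int := |a.1 - b.1| + |a.2 - b.2|

-- seq[:i] + seq[i+1:] for 0 ≤ i < len(seq) is exactly take i ++ drop (i+1)
def gerarPermutacoes (seq : List String) : List (List String) :=
  if seq.length = 0 then [[]]
  else if seq.length = 1 then [seq]
  else
    (List.range seq.length).attach.foldl
      (fun perms i =>
        let atual := seq.getD i.1 ""
        let resto := seq.take i.1 ++ seq.drop (i.1 + 1)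
        perms ++ (gerarPermutacoes resto).map (fun p => atual :: p))
      []
termination_by seq.length
decreasing_by
  have hi : i.1 < seq.length := List.mem_range.mp i.2
  simp only [List.length_append, List.length_take, List.length_drop]
  omega

def calcular_rotas (pontos : List (String × Int × Int)) : List (List String × Int) :=
  let d : PySem.Dict String (Int × Int) := PySem.Dict.ofList pontos
  let entregas := d.items.filter (fun kv => kv.1 ≠ "R")
  let letras := entregas.map (fun kv => kv.1)
  if letras = [] then []   -- A raises ValueError here; excluded by Pre_
  else
    (gerarPermutacoes letras).foldl
      (fun rotas perm =>
        let rota := "R" :: (perm ++ ["R"])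
        let custo := (List.range (rota.length - 1)).foldl
          (fun c i => c + pvDist (d.getD (rota.getD i "") (0, 0)) (d.getD (rota.getD (i + 1) "") (0, 0)))
          0
        rotas ++ [(rota, custo)])
      []

-- ===== PORT B =====
def pvExpand (f : List (List String × List String)) : List (List String × List String) :=
  f.flatMap (fun pr =>
    (List.range pr.2.length).map (fun i =>
      (pr.1 ++ [pr.2.getD i ""], pr.2.take i ++ pr.2.drop (i + 1))))

def calcular_rotas_alt (pontos : List (String × Int × Int)) : List (List String × Int) :=
  let d : PySem.Dict String (Int × Int) := PySem.Dict.ofList pontos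
  let letras := d.keys.filter (fun k => k ≠ "R")
  if letras = [] then []   -- B raises ValueError here; excluded by Pre_
  else
    let frontier := letras.foldl (fun f _ => pvExpand f) [([], letras)]
    frontier.map (fun pr =>
      let rota := "R" :: (pr.1 ++ ["R"])
      (rota, ((rota.zip (rota.drop 1)).map
        (fun ab => |(d.getD ab.1 (0, 0)).1 - (d.getD ab.2 (0, 0)).1|
                 + |(d.getD ab.1 (0, 0)).2 - (d.getD ab.2 (0, 0)).2|)).sum))

-- ===== PRECONDITION & SPEC =====
-- A (and B) raise ValueError when the dict has no key other than "R", and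
-- KeyError when "R" itself is missing; Pre_ excludes exactly those inputs.
def Pre_calcular_rotas (pontos : List (String × Int × Int)) : Prop :=
  (PySem.Dict.ofList pontos).contains "R" = true ∧ ∃ kv ∈ pontos, kv.1 ≠ "R"
instance (pontos : List (String × Int × Int)) : Decidable (Pre_calcular_rotas pontos) := by
  unfold Pre_calcular_rotas; infer_instance

def pvWitness_calcular_rotas : (List (String × Int × Int)) :=
  [("R", 0, 0), ("A", 1, 2), ("B", 3, 1)]

def Spec_calcular_rotas (pontos : List (String × Int × Int)) (out : List (List String × Int)) : Prop := out = calcular_rotas_alt pontos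
instance (pontos : List (String × Int × Int)) (out : List (List String × Int)) : Decidable (Spec_calcular_rotas pontos out) := by unfold Spec_calcular_rotas; infer_instance

-- ===== CLAIM (what is proved, stated in full; the proofs are below) =====
def Claim_equal_calcular_rotas : Prop := ∀ (pontos : List (String × Int × Int)), Dom_calcular_rotas pontos → Pre_calcular_rotas pontos → Spec_calcular_rotas pontos (calcular_rotas pontos)

-- ===== LEMMAS AND PROOFS =====

-- unfoldings of PySem.List.permutations
theorem perm_zero {α : Type} (xs : List α) : PySem.List.permutations xs 0 = [[]] := by
  rw [PySem.List.permutations]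

theorem perm_succ {α : Type} (xs : List α) (r : Nat) :
    PySem.List.permutations xs (r + 1)
      = (List.range xs.length).flatMap (fun i => match xs[i]? with
          | none => []
          | some x => (PySem.List.permutations (xs.eraseIdx i) r).map (fun p => x :: p)) := by
  rw [PySem.List.permutations]; rfl

-- A's recursive generator is itertools-style full-length permutations
theorem gerar_eq_permutations (seq : List String) :
    gerarPermutacoes seq = PySem.List.permutations seq seq.length := by
  induction hn : seq.length using Nat.strong_induction_on generalizing seq with
  | _ n IH =>
  subst hn
  rw [gerarPermutacoes]
  split
  · next h0 => rw [h0, perm_zero]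
  · split
    · next h0 h1 =>
      obtain ⟨x, rfl⟩ := List.length_eq_one_iff.mp h1
      simp [perm_succ]
    · next h0 h1 =>
      rw [PySem.List.foldl_append_eq_flatMap, List.nil_append]
      obtain ⟨m, hm⟩ : ∃ m, seq.length = m + 1 := ⟨seq.length - 1, by omega⟩
      rw [hm, perm_succ]
      have hfun : (fun i : {x // x ∈ List.range (m + 1)} =>
            List.map (fun p => seq.getD i.1 "" :: p)
              (gerarPermutacoes (List.take i.1 seq ++ List.drop (i.1 + 1) seq)))
          = fun i => (match seq[i.1]? with
            | none => ([] : List (List String))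
            | some x => (PySem.List.permutations (seq.eraseIdx i.1) m).map (fun p => x :: p)) := by
        funext i
        have hi : i.1 < seq.length := by have := List.mem_range.mp i.2; omega
        have hlen : (seq.eraseIdx i.1).length = m := by
          rw [List.length_eraseIdx_of_lt hi]; omega
        simp only [List.getElem?_eq_getElem hi]
        rw [← List.eraseIdx_eq_take_drop_succ, IH m (by omega) _ hlen,
            List.getD_eq_getElem seq "" hi]
      rw [hfun]
      simp only [List.flatMap_def, hm]
      simp only [List.map_subtype, List.unattach_attach]
      congr 1
      apply List.map_congr_left
      intro x hx
      cases seq[x]? <;> rfl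

-- k expansion steps: the prefixes of the frontier are the k-permutations
theorem expand_iter_fst (k : Nat) (F : List (List String × List String)) :
    ((pvExpand^[k]) F).map (fun pr => pr.1)
      = F.flatMap (fun pr => (PySem.List.permutations pr.2 k).map (fun p => pr.1 ++ p)) := by
  induction k generalizing F with
  | zero =>
    simp only [perm_zero, Function.iterate_zero, id_eq, List.map_singleton, List.append_nil]
    exact List.map_eq_flatMap
  | succ k ih =>
    rw [Function.iterate_succ_apply, ih]
    rw [pvExpand, List.flatMap_assoc]
    apply List.flatMap_congr
    intro pr _
    rw [List.flatMap_map, perm_succ, List.map_flatMap]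
    apply List.flatMap_congr
    intro i hi
    have hilt : i < pr.2.length := List.mem_range.mp hi
    simp only [List.getElem?_eq_getElem hilt, ← List.eraseIdx_eq_take_drop_succ,
      List.getD_eq_getElem pr.2 "" hilt, List.map_map]
    apply List.map_congr_left
    intro p _
    simp

-- B's 'for _ in letras' loop is iteration of pvExpand
theorem foldl_const_expand (l : List String) (F : List (List String × List String)) :
    l.foldl (fun f _ => pvExpand f) F = (pvExpand^[l.length]) F := by
  induction l generalizing F with
  | nil => rfl
  | cons a t ih => rw [List.foldl_cons, ih, List.length_cons, Function.iterate_succ_apply]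

-- the index-based cost loop equals the zip-pairs sum
theorem cost_eq (g : String → String → Int) (l : List String) :
    (List.range (l.length - 1)).foldl (fun c i => c + g (l.getD i "") (l.getD (i + 1) "")) 0
      = ((l.zip (l.drop 1)).map (fun ab => g ab.1 ab.2)).sum := by
  rw [PySem.List.foldl_add, Int.zero_add]
  congr 1
  apply List.ext_getElem
  · simp
  · intro i h1 h2
    simp only [List.getElem_map, List.getElem_range, List.getElem_zip, List.getElem_drop]
    have hi : i < l.length - 1 := by simpa using h1
    rw [List.getD_eq_getElem l "" (by omega), List.getD_eq_getElem l "" (by omega)]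
    simp [Nat.add_comm]

-- ===== VERDICT (by name: the statement is the Claim_ definition above) =====
theorem calcular_rotas_spec : Claim_equal_calcular_rotas := by
  unfold Claim_equal_calcular_rotas Spec_calcular_rotas
  intro pontos _ _
  simp only [calcular_rotas, calcular_rotas_alt]
  have hletras : (PySem.Dict.ofList pontos).keys.filter (fun k => k ≠ "R")
      = ((PySem.Dict.ofList pontos).items.filter (fun kv => kv.1 ≠ "R")).map (fun kv => kv.1) := by
    rw [show (PySem.Dict.ofList pontos).keys
          = (PySem.Dict.ofList pontos).items.map (fun kv => kv.1) from rfl]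
    rw [List.filter_map]
    rfl
  rw [hletras]
  set d := PySem.Dict.ofList pontos with hd
  set letras := (d.items.filter (fun kv => kv.1 ≠ "R")).map (fun kv => kv.1) with hl
  by_cases hL : letras = []
  · simp [hL]
  · simp only [if_neg hL]
    rw [PySem.List.foldl_append_singleton_eq_map, List.nil_append]
    rw [foldl_const_expand]
    rw [show (fun pr : List String × List String =>
          ("R" :: (pr.1 ++ ["R"]),
            (("R" :: (pr.1 ++ ["R"])).zip (("R" :: (pr.1 ++ ["R"])).drop 1) |>.map
              (fun ab => |((PySem.Dict.ofList pontos).getD ab.1 (0, 0)).1 - ((PySem.Dict.ofList pontos).getD ab.2 (0, 0)).1|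
                 + |((PySem.Dict.ofList pontos).getD ab.1 (0, 0)).2 - ((PySem.Dict.ofList pontos).getD ab.2 (0, 0)).2|)).sum))
        = (fun pre : List String =>
          ("R" :: (pre ++ ["R"]),
            (("R" :: (pre ++ ["R"])).zip (("R" :: (pre ++ ["R"])).drop 1) |>.map
              (fun ab => |((PySem.Dict.ofList pontos).getD ab.1 (0, 0)).1 - ((PySem.Dict.ofList pontos).getD ab.2 (0, 0)).1|
                 + |((PySem.Dict.ofList pontos).getD ab.1 (0, 0)).2 - ((PySem.Dict.ofList pontos).getD ab.2 (0, 0)).2|)).sum))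
          ∘ (fun pr : List String × List String => pr.1) from rfl, ← List.map_map]
    rw [expand_iter_fst, List.flatMap_singleton]
    simp only [List.nil_append]
    rw [List.map_id', ← gerar_eq_permutations]
    apply List.map_congr_left
    intro perm _
    refine Prod.ext rfl ?_
    simp only []
    rw [cost_eq (fun a b => pvDist (d.getD a (0, 0)) (d.getD b (0, 0)))]
    simp [pvDist, ← hd]
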